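-- pv_equiv track=rewrite | github.com/baeksangha/python_sw | 9015_배열의분할/source.py | solution
-- ===== SOURCE A (Python) =====
-- def solution(n, arr):
--     flag = -1
--     answer = 1
--     for i in range(1, n):
--         if flag == -1:
--             if arr[i] > arr[i-1]:
--                 flag = 0
--             elif arr[i] < arr[i-1]:
--                 flag = 1
--         else:
--             if flag == 0 and arr[i] < arr[i-1]:
--                 flag = -1
--                 answer += 1
--             elif flag == 1 and arr[i] > arr[i-1]:
--                 flag = -1
--                 answer += 1
--     return answer
-- ===== SOURCE B (Python) =====
-- def solution(n, arr):
--     # phase 1: signs of the strict differences (equal neighbours dropped)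
--     signs = [1 if arr[i] > arr[i-1] else -1
--              for i in range(1, n) if arr[i] != arr[i-1]]
--     # phase 2: positions where the sign flips
--     changes = [j for j in range(1, len(signs)) if signs[j] != signs[j-1]]
--     # phase 3: a segment ends at a sign flip, and the flip right after a
--     # chosen break opens the next segment, so it cannot end one: greedily
--     # pick flips at distance >= 2 apart (activity-selection style)
--     count, last = 0, -2
--     for p in changes:
--         if p >= last + 2:
--             count += 1
--             last = p
--     return 1 + count
-- ===== Notes on version B (the rewrite author's own statement) =====
-- stated objective: alternative
-- what changed: Replaces A's direction-flag state machine with a three-phase pipeline: build the nonzero difference-sign table, list the positions where the sign flips, and greedily select flips at distance >= 2 apart (activity-selection style); the answer is 1 plus the number of selected flips.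
import Mathlib
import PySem

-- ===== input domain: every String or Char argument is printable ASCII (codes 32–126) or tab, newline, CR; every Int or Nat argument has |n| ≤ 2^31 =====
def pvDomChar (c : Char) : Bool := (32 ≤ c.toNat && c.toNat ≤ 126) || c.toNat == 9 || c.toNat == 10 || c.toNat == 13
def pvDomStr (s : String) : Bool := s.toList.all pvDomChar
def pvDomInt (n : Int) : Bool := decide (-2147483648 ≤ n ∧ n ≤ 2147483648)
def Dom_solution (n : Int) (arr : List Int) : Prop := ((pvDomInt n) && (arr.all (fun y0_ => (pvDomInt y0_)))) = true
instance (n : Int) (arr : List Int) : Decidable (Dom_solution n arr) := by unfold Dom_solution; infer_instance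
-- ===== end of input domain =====

-- B replaces A's direction-flag state machine by counting sign-flip positions
-- and greedily selecting flips at distance >= 2 (activity-selection style).

-- ===== PORT A =====
-- loop body of A: state is (flag, answer); indexing via pyGetD (in range under Pre_solution)
def stepA (arr : List Int) (st : Int × Int) (i : Int) : Int × Int :=
  let ai := PySem.List.pyGetD arr i 0
  let ap := PySem.List.pyGetD arr (i - 1) 0
  if st.1 = -1 then
    if ai > ap then (0, st.2)
    else if ai < ap then (1, st.2)
    else st
  else if st.1 = 0 ∧ ai < ap then (-1, st.2 + 1)
  else if st.1 = 1 ∧ ai > ap then (-1, st.2 + 1)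
  else st

def solution (n : Int) (arr : List Int) : Int :=
  ((PySem.List.pyRange 1 n 1).foldl (stepA arr) (-1, 1)).2

-- ===== PORT B =====
-- phase 1: the table of nonzero difference signs (comprehension with filter, as in Source B)
def signTable (n : Int) (arr : List Int) : List Int :=
  ((PySem.List.pyRange 1 n 1).filter
      (fun i => PySem.List.pyGetD arr i 0 ≠ PySem.List.pyGetD arr (i - 1) 0)).map
    (fun i => if PySem.List.pyGetD arr i 0 > PySem.List.pyGetD arr (i - 1) 0 then (1 : Int) else -1)

-- phase 2: positions where the sign flips
def changeList (s : List Int) : List Int :=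
  (PySem.List.pyRange 1 (s.length : Int) 1).filter
    (fun j => PySem.List.pyGetD s j 0 ≠ PySem.List.pyGetD s (j - 1) 0)

-- phase 3: greedy selection of flips at distance >= 2; state is (count, last)
def greedyStep (st : Int × Int) (p : Int) : Int × Int :=
  if p ≥ st.2 + 2 then (st.1 + 1, p) else st

def solution_alt (n : Int) (arr : List Int) : Int :=
  1 + ((changeList (signTable n arr)).foldl greedyStep (0, -2)).1

-- ===== PRECONDITION & SPEC =====
-- Pre_ excludes exactly the inputs where Python A raises IndexError: n > len(arr) with n ≥ 2.
def Pre_solution (n : Int) (arr : List Int) : Prop := n ≤ arr.length ∨ n ≤ 1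
instance (n : Int) (arr : List Int) : Decidable (Pre_solution n arr) := by unfold Pre_solution; infer_instance
def pvWitness_solution : Int × List Int := (5, [1, 3, 2, 2, 4])

def Spec_solution (n : Int) (arr : List Int) (out : Int) : Prop := out = solution_alt n arr
instance (n : Int) (arr : List Int) (out : Int) : Decidable (Spec_solution n arr out) := by unfold Spec_solution; infer_instance

-- ===== CLAIM (what is proved, stated in full; the proofs are below) =====
def Claim_equal_solution : Prop := ∀ (n : Int) (arr : List Int), Dom_solution n arr → Pre_solution n arr → Spec_solution n arr (solution n arr)

-- ===== LEMMAS AND PROOFS =====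

-- proof-only intermediate: the direction-state machine over the sign table
def stepB (st : Int × Int) (s : Int) : Int × Int :=
  if st.2 = 0 then (st.1, s)
  else if s ≠ st.2 then (st.1 + 1, 0)
  else st

-- correspondence between A's flag and the intermediate direction state
def conv (flag : Int) : Int := if flag = -1 then 0 else if flag = 0 then 1 else -1

theorem key (arr : List Int) : ∀ (l : List Int) (flag answer : Int),
    (flag = -1 ∨ flag = 0 ∨ flag = 1) →
    (l.foldl (stepA arr) (flag, answer)).2 =
      (((l.filter (fun i => PySem.List.pyGetD arr i 0 ≠ PySem.List.pyGetD arr (i - 1) 0)).map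
          (fun i => if PySem.List.pyGetD arr i 0 > PySem.List.pyGetD arr (i - 1) 0 then (1 : Int) else -1)).foldl
        stepB (answer, conv flag)).1 := by
  intro l
  induction l with
  | nil => intro flag answer _; simp
  | cons i l ih =>
    intro flag answer hflag
    simp only [List.foldl_cons, List.filter_cons]
    rcases lt_trichotomy (PySem.List.pyGetD arr i 0) (PySem.List.pyGetD arr (i - 1) 0) with h | h | h
    · rcases hflag with hf | hf | hf <;> subst hf <;>
        simp only [stepA, conv, ne_eq] <;>
        norm_num [h, ne_of_lt h, not_lt_of_gt h] <;>
        rw [ih _ _ (by norm_num)] <;> simp [conv, stepB]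
    · rcases hflag with hf | hf | hf <;> subst hf <;>
        simp only [stepA, conv, ne_eq] <;>
        norm_num [h]
      · simpa [conv] using ih (-1) answer (by norm_num)
      · simpa [conv] using ih 0 answer (by norm_num)
      · simpa [conv] using ih 1 answer (by norm_num)
    · rcases hflag with hf | hf | hf <;> subst hf <;>
        simp only [stepA, conv, ne_eq] <;>
        norm_num [h, ne_of_gt h, not_lt_of_gt h] <;>
        rw [ih _ _ (by norm_num)] <;> simp [conv, stepB]

-- pyGetD through a cons, for a nonnegative index
theorem pyGetD_cons_shift (a : Int) (l : List Int) (i : Int) (h : 0 ≤ i) :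
    PySem.List.pyGetD (a :: l) (i + 1) 0 = PySem.List.pyGetD l i 0 := by
  obtain ⟨k, rfl⟩ := Int.eq_ofNat_of_zero_le h
  have : ((k : Int) + 1) = ((k + 1 : Nat) : Int) := by push_cast; ring
  rw [this, PySem.List.pyGetD_natCast, PySem.List.pyGetD_natCast]
  simp [List.getD]

-- shifting a unit range by one
theorem pyRange_succ_shift (a b : Int) :
    PySem.List.pyRange (a + 1) b 1 = (PySem.List.pyRange a (b - 1) 1).map (· + 1) := by
  rw [PySem.List.pyRange_one, PySem.List.pyRange_one, List.map_map]
  have h : b - (a + 1) = b - 1 - a := by ring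
  rw [h]
  apply List.map_congr_left
  intro k _
  simp [Function.comp]
  ring

-- the change list of a two-or-more element list, structurally
theorem changeList_cons (x y : Int) (t : List Int) :
    changeList (x :: y :: t) =
      (if y ≠ x then [1] else []) ++ (changeList (y :: t)).map (· + 1) := by
  unfold changeList
  have hlen2 : (((x :: y :: t).length : Int)) = (t.length : Int) + 2 := by push_cast [List.length_cons]; ring
  have hlen1 : (((y :: t).length : Int)) = (t.length : Int) + 1 := by push_cast [List.length_cons]; ring
  rw [hlen2, hlen1]
  rw [PySem.List.pyRange_one_cons (by omega)]
  have hshift : PySem.List.pyRange (1 + 1) ((t.length : Int) + 2) 1 =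
      (PySem.List.pyRange 1 ((t.length : Int) + 1) 1).map (· + 1) := by
    rw [pyRange_succ_shift]
    have h21 : (t.length : Int) + 2 - 1 = (t.length : Int) + 1 := by ring
    rw [h21]
  rw [hshift, List.filter_cons]
  have h1 : PySem.List.pyGetD (x :: y :: t) 1 0 = y := by
    rw [show (1 : Int) = ((1 : Nat) : Int) by norm_num, PySem.List.pyGetD_natCast]
    rfl
  have h0 : PySem.List.pyGetD (x :: y :: t) (1 - 1) 0 = x := by
    norm_num [PySem.List.pyGetD_zero_cons]
  rw [List.filter_map]
  have hcong : ∀ j ∈ PySem.List.pyRange 1 ((t.length : Int) + 1) 1,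
      ((fun j => decide (PySem.List.pyGetD (x :: y :: t) j 0 ≠ PySem.List.pyGetD (x :: y :: t) (j - 1) 0)) ∘ (· + 1)) j =
      (fun j => decide (PySem.List.pyGetD (y :: t) j 0 ≠ PySem.List.pyGetD (y :: t) (j - 1) 0)) j := by
    intro j hj
    have hj1 : 1 ≤ j := (PySem.List.mem_pyRange_one.mp hj).1
    simp only [Function.comp]
    have e1 : PySem.List.pyGetD (x :: y :: t) (j + 1) 0 = PySem.List.pyGetD (y :: t) j 0 :=
      pyGetD_cons_shift x (y :: t) j (by omega)
    have e2 : PySem.List.pyGetD (x :: y :: t) (j + 1 - 1) 0 = PySem.List.pyGetD (y :: t) (j - 1) 0 := by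
      have : j + 1 - 1 = (j - 1) + 1 := by ring
      rw [this]
      exact pyGetD_cons_shift x (y :: t) (j - 1) (by omega)
    rw [e1, e2]
  rw [List.filter_congr hcong, h1, h0]
  by_cases hyx : y = x <;> simp [hyx]

theorem mem_changeList_ge_one (s : List Int) (p : Int) (hp : p ∈ changeList s) : 1 ≤ p := by
  unfold changeList at hp
  exact (PySem.List.mem_pyRange_one.mp (List.mem_filter.mp hp).1).1

-- shifting every flip position by one shifts the greedy state by one
theorem greedy_shift (c : List Int) : ∀ (a l : Int),
    (c.map (· + 1)).foldl greedyStep (a, l) =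
      (((c.foldl greedyStep (a, l - 1)).1), (c.foldl greedyStep (a, l - 1)).2 + 1) := by
  induction c with
  | nil => intro a l; simp
  | cons p t ih =>
    intro a l
    simp only [List.map_cons, List.foldl_cons, greedyStep]
    have hiff : (p + 1 ≥ l + 2) ↔ (p ≥ l - 1 + 2) := by omega
    by_cases h : p ≥ l - 1 + 2
    · rw [if_pos (hiff.mpr h), if_pos h]
      have := ih (a + 1) (p + 1)
      simpa using this
    · rw [if_neg (fun hc => h (hiff.mp hc)), if_neg h]
      exact ih a l

-- the count component is an offset
theorem greedy_offset (c : List Int) : ∀ (a l : Int),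
    c.foldl greedyStep (a, l) =
      ((c.foldl greedyStep (0, l)).1 + a, (c.foldl greedyStep (0, l)).2) := by
  induction c with
  | nil => intro a l; simp
  | cons p t ih =>
    intro a l
    simp only [List.foldl_cons, greedyStep]
    by_cases h : p ≥ l + 2
    · rw [if_pos h, if_pos h, ih (a + 1) p, ih (0 + 1) p]
      simp only [Prod.mk.injEq]
      exact ⟨by ring, trivial⟩
    · rw [if_neg h, if_neg h]; exact ih a l

-- the initial 'last' is irrelevant below -1 when every flip position is >= 1
theorem greedy_init (c : List Int) (hc : ∀ p ∈ c, 1 ≤ p) (l1 l2 : Int)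
    (h1 : l1 ≤ -1) (h2 : l2 ≤ -1) :
    (c.foldl greedyStep (0, l1)).1 = (c.foldl greedyStep (0, l2)).1 := by
  cases c with
  | nil => rfl
  | cons p t =>
    have hp := hc p (List.mem_cons_self)
    simp only [List.foldl_cons, greedyStep]
    rw [if_pos (by omega), if_pos (by omega)]

-- main bridge: the direction machine over the signs equals 1 + greedy over the flips
theorem machine_eq_greedy : ∀ (k : Nat) (s : List Int), s.length ≤ k →
    (∀ x ∈ s, x ≠ 0) → ∀ (a : Int),
    (s.foldl stepB (a, 0)).1 = a + ((changeList s).foldl greedyStep (0, -2)).1 := by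
  intro k
  induction k with
  | zero =>
    intro s hs _ a
    have hsn : s = [] := by cases s <;> simp_all
    subst hsn
    simp [changeList, PySem.List.pyRange_one_eq_nil]
  | succ k ih =>
    intro s hs hnz a
    match s with
    | [] => simp [changeList, PySem.List.pyRange_one_eq_nil]
    | [x] =>
      simp [stepB, changeList, PySem.List.pyRange_one_eq_nil]
    | x :: y :: t =>
      have hx : x ≠ 0 := hnz x (by simp)
      have hc1 : ∀ p ∈ changeList (y :: t), 1 ≤ p := fun p hp => mem_changeList_ge_one _ p hp
      by_cases hyx : y = x
      · have lhs : ((x :: y :: t).foldl stepB (a, 0)).1 = ((y :: t).foldl stepB (a, 0)).1 := by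
          subst hyx
          simp [stepB, hx]
        rw [lhs, ih (y :: t) (by simp at hs ⊢; omega) (fun z hz => hnz z (by simp at hz ⊢; tauto)) a]
        congr 1
        rw [changeList_cons, if_neg (by simp [hyx]), List.nil_append, greedy_shift]
        exact greedy_init (changeList (y :: t)) hc1 (-2) (-2 - 1) (by omega) (by omega)
      · have lhs : ((x :: y :: t).foldl stepB (a, 0)).1 = (t.foldl stepB (a + 1, 0)).1 := by
          simp [stepB, hx, hyx]
        rw [lhs, ih t (by simp at hs ⊢; omega) (fun z hz => hnz z (by simp [hz])) (a + 1)]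
        rw [changeList_cons]
        rw [if_pos hyx]
        simp only [List.singleton_append, List.foldl_cons]
        rw [show greedyStep (0, -2) 1 = (1, 1) by simp [greedyStep]]
        rw [greedy_shift]
        have hro : ((changeList (y :: t)).foldl greedyStep (1, 1 - 1)).1 =
            ((changeList (y :: t)).foldl greedyStep (0, 1 - 1)).1 + 1 := by
          rw [greedy_offset]
        have core : ((changeList t).foldl greedyStep (0, -2)).1 =
            ((changeList (y :: t)).foldl greedyStep (0, 1 - 1)).1 := by
          match t with
          | [] =>
            simp [changeList, PySem.List.pyRange_one_eq_nil]
          | z :: t' =>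
            have hc2 : ∀ p ∈ changeList (z :: t'), 1 ≤ p :=
              fun p hp => mem_changeList_ge_one _ p hp
            rw [changeList_cons y z t']
            by_cases hzy : z = y
            · rw [if_neg (by simp [hzy]), List.nil_append, greedy_shift]
              exact greedy_init (changeList (z :: t')) hc2 (-2) (1 - 1 - 1) (by omega) (by omega)
            · rw [if_pos hzy]
              simp only [List.singleton_append, List.foldl_cons]
              rw [show greedyStep (0, 1 - 1) 1 = (0, 1 - 1) by simp [greedyStep]]
              rw [greedy_shift]
              exact greedy_init (changeList (z :: t')) hc2 (-2) (1 - 1 - 1) (by omega) (by omega)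
        simp only [hro, core]
        ring

theorem solution_spec : Claim_equal_solution := by
  intro n arr _ _
  unfold Spec_solution solution solution_alt
  rw [key arr (PySem.List.pyRange 1 n 1) (-1) 1 (Or.inl rfl)]
  have hnz : ∀ x ∈ signTable n arr, x ≠ 0 := by
    intro x hx
    unfold signTable at hx
    obtain ⟨i, _, hi⟩ := List.mem_map.mp hx
    split at hi <;> omega
  have := machine_eq_greedy (signTable n arr).length (signTable n arr) le_rfl hnz 1
  unfold signTable at this ⊢
  simp only [conv]
  norm_num at this ⊢
  rw [this]
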